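-- pv_equiv track=rewrite | github.com/trevormax-smith/advent_of_code | 2017/day24.py | get_bridge_strengths
-- ===== SOURCE A (Python) =====
-- def get_connecting_pieces(connector, pieces):
--     candidate_connections = set()
--
--     for piece in pieces:
--         if piece[0] == connector or piece[1] == connector:
--             candidate_connections.add(piece)
--
--     return candidate_connections
--
-- def get_bridge_strengths(open_connector, pieces):
--
--     if not pieces:
--         return []
--
--     possible_connecting_pieces = get_connecting_pieces(open_connector, pieces)
--
--     strengths = []
--
--     for possible_connecting_piece in possible_connecting_pieces:
--
--         new_connector = possible_connecting_piece[0] \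
--             if possible_connecting_piece[0] != open_connector \
--             else possible_connecting_piece[1]
--
--         other_pieces = pieces.difference([possible_connecting_piece])
--
--         this_connection_strengths = get_bridge_strengths(new_connector, other_pieces)
--
--         if not this_connection_strengths:
--             strengths.append(possible_connecting_piece[0] + possible_connecting_piece[1])
--         else:
--             strengths.extend([
--                 tcs + possible_connecting_piece[0] + possible_connecting_piece[1]
--                 for tcs in this_connection_strengths
--             ])
--
--     return strengths
-- ===== SOURCE B (Python) =====
-- def get_bridge_strengths(open_connector, pieces):
--     # Top-down accumulator-passing DFS: the running strength is passed down,
--     # and a value is emitted only at dead ends (no onward connection).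
--     strengths = []
--
--     def dfs(connector, remaining, total, at_root):
--         candidates = {p for p in remaining if p[0] == connector or p[1] == connector}
--         if not candidates:
--             if not at_root:
--                 strengths.append(total)
--             return
--         for piece in candidates:
--             next_connector = piece[1] if piece[0] == connector else piece[0]
--             dfs(next_connector, remaining.difference([piece]),
--                 total + piece[0] + piece[1], False)
--
--     dfs(open_connector, pieces, 0, True)
--     return strengths
-- ===== Notes on version B (the rewrite author's own statement) =====
-- stated objective: alternative
-- what changed: Replaces the bottom-up recursion that rebuilds every child's strength list with map/extend on the unwind by a top-down accumulator-passing DFS that threads the running strength down and appends it once at each dead end.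
import Mathlib
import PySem

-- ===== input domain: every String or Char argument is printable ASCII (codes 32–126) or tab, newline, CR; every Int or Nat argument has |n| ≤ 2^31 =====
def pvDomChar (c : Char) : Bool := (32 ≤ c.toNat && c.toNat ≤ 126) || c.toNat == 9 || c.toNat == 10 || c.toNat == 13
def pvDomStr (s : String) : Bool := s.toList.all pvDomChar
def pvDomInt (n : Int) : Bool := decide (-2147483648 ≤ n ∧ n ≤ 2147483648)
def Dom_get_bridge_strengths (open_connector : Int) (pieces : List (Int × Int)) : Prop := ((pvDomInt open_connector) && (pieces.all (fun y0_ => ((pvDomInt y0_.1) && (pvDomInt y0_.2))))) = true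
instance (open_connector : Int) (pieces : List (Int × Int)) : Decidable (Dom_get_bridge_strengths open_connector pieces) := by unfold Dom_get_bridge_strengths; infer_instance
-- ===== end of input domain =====

-- B replaces A's bottom-up recursion (each child's strength list rebuilt with map/extend
-- on the unwind) by a top-down accumulator-passing DFS that threads the running strength
-- down and appends it once at each dead end; same traversal order, same list.
-- The Python set arguments are modelled, per convention, as their distinct-element
-- lists in insertion order.

-- ===== PORT A =====
def get_connecting_pieces (connector : Int) (pieces : PySem.Set (Int × Int)) : PySem.Set (Int × Int) :=
  pieces.foldl
    (fun candidate_connections piece =>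
      if piece.1 = connector ∨ piece.2 = connector then
        PySem.Set.add candidate_connections piece
      else candidate_connections)
    PySem.Set.empty

-- used by the ports' termination proofs
theorem mem_of_mem_connecting_fold (connector : Int) (pieces : List (Int × Int))
    (s : PySem.Set (Int × Int)) (p : Int × Int)
    (hp : p ∈ pieces.foldl
      (fun c piece => if piece.1 = connector ∨ piece.2 = connector then PySem.Set.add c piece else c) s) :
    p ∈ s ∨ p ∈ pieces := by
  induction pieces generalizing s with
  | nil => exact Or.inl hp
  | cons q qs ih =>
    rcases ih _ hp with h | h
    · by_cases hq : q.1 = connector ∨ q.2 = connector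
      · simp only [hq, if_pos] at h
        rcases (PySem.Set.mem_add s q p).1 h with h' | h'
        · exact Or.inl h'
        · exact Or.inr (by simp [h'])
      · simp only [hq, if_neg, not_false_iff] at h
        exact Or.inl h
    · exact Or.inr (List.mem_cons_of_mem _ h)

theorem length_diff_single_lt (xs : List (Int × Int)) (p : Int × Int) (hp : p ∈ xs) :
    (PySem.Set.diff xs [p]).length < xs.length := by
  simp only [PySem.Set.diff]
  refine List.length_filter_lt_length_iff_exists.2 ⟨p, hp, ?_⟩
  simp [PySem.Set.contains]

def get_bridge_strengths (open_connector : Int) (pieces : List (Int × Int)) : List Int :=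
  if pieces = [] then []
  else
    (get_connecting_pieces open_connector pieces).attach.foldl
      (fun strengths pcp =>
        let piece := pcp.1
        let new_connector := if piece.1 ≠ open_connector then piece.1 else piece.2
        let other_pieces := PySem.Set.diff pieces [piece]
        let this_connection_strengths := get_bridge_strengths new_connector other_pieces
        if this_connection_strengths = [] then
          strengths ++ [piece.1 + piece.2]
        else
          strengths ++ this_connection_strengths.map (fun tcs => tcs + piece.1 + piece.2))
      []
termination_by pieces.length
decreasing_by
  exact length_diff_single_lt pieces pcp.1
    ((mem_of_mem_connecting_fold open_connector pieces PySem.Set.empty pcp.1 pcp.2).resolve_left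
      (by simp [PySem.Set.empty]))

-- ===== PORT B =====
-- the set comprehension {p for p in remaining if p[0] == connector or p[1] == connector}
def connecting_alt (connector : Int) (remaining : List (Int × Int)) : PySem.Set (Int × Int) :=
  PySem.Set.ofList (remaining.filter (fun p => p.1 == connector || p.2 == connector))

-- used by the port's termination proof
theorem mem_of_mem_connecting_alt (connector : Int) (remaining : List (Int × Int))
    (p : Int × Int) (hp : p ∈ connecting_alt connector remaining) : p ∈ remaining :=
  (List.mem_filter.1 ((PySem.Set.mem_ofList _ p).1 hp)).1

def dfs_alt (connector : Int) (remaining : List (Int × Int)) (total : Int) (atRoot : Bool)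
    (strengths : List Int) : List Int :=
  let candidates := connecting_alt connector remaining
  if candidates = [] then
    (if atRoot then strengths else strengths ++ [total])
  else
    candidates.attach.foldl
      (fun acc pcp =>
        let piece := pcp.1
        let next_connector := if piece.1 = connector then piece.2 else piece.1
        dfs_alt next_connector (PySem.Set.diff remaining [piece])
          (total + piece.1 + piece.2) false acc)
      strengths
termination_by remaining.length
decreasing_by
  exact length_diff_single_lt remaining pcp.1 (mem_of_mem_connecting_alt connector remaining pcp.1 pcp.2)

def get_bridge_strengths_alt (open_connector : Int) (pieces : List (Int × Int)) : List Int :=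
  dfs_alt open_connector pieces 0 true []

-- ===== PRECONDITION & SPEC =====
def Spec_get_bridge_strengths (open_connector : Int) (pieces : List (Int × Int)) (out : List Int) : Prop := out = get_bridge_strengths_alt open_connector pieces
instance (open_connector : Int) (pieces : List (Int × Int)) (out : List Int) : Decidable (Spec_get_bridge_strengths open_connector pieces out) := by unfold Spec_get_bridge_strengths; infer_instance

-- ===== CLAIM (what is proved, stated in full; the proofs are below) =====
def Claim_equal_get_bridge_strengths : Prop := ∀ (open_connector : Int) (pieces : List (Int × Int)), Dom_get_bridge_strengths open_connector pieces → Spec_get_bridge_strengths open_connector pieces (get_bridge_strengths open_connector pieces)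

-- ===== LEMMAS AND PROOFS =====

-- the two candidate computations produce the same list
theorem connecting_eq (c : Int) (xs : List (Int × Int)) :
    get_connecting_pieces c xs = connecting_alt c xs := by
  have key : ∀ (l : List (Int × Int)) (s : PySem.Set (Int × Int)),
      l.foldl (fun cc piece => if piece.1 = c ∨ piece.2 = c then PySem.Set.add cc piece else cc) s
        = (l.filter (fun p => p.1 == c || p.2 == c)).foldl PySem.Set.add s := by
    intro l
    induction l with
    | nil => intro s; rfl
    | cons q qs ih =>
      intro s
      by_cases hq : q.1 = c ∨ q.2 = c
      · simp only [List.foldl_cons, hq, if_pos, List.filter_cons,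
          show (q.1 == c || q.2 == c) = true by simpa [decide_eq_true_eq] using hq]
        exact ih _
      · simp only [List.foldl_cons, hq, if_neg, not_false_iff, List.filter_cons,
          show (q.1 == c || q.2 == c) = false by simpa [decide_eq_true_eq] using hq]
        exact ih _
  simp only [get_connecting_pieces, connecting_alt, PySem.Set.ofList_eq_foldl]
  exact key xs PySem.Set.empty

-- A's per-candidate contribution
def gA (c : Int) (pieces : List (Int × Int)) (p : Int × Int) : List Int :=
  if get_bridge_strengths (if p.1 ≠ c then p.1 else p.2) (PySem.Set.diff pieces [p]) = []
  then [p.1 + p.2]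
  else (get_bridge_strengths (if p.1 ≠ c then p.1 else p.2) (PySem.Set.diff pieces [p])).map
         (fun tcs => tcs + p.1 + p.2)

theorem gA_ne_nil (c : Int) (pieces : List (Int × Int)) (p : Int × Int) :
    gA c pieces p ≠ [] := by
  unfold gA
  split <;> split <;> simp_all

theorem A_nil (c : Int) : get_bridge_strengths c [] = [] := by
  rw [get_bridge_strengths.eq_def]; simp

-- closed form of A's recursion step
theorem A_eq_flatMap (c : Int) (pieces : List (Int × Int)) :
    get_bridge_strengths c pieces = (get_connecting_pieces c pieces).flatMap (gA c pieces) := by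
  by_cases hnil : pieces = []
  · subst hnil
    simp [A_nil, get_connecting_pieces, PySem.Set.empty]
  · rw [get_bridge_strengths.eq_def]
    simp only [hnil, if_neg, not_false_iff]
    rw [List.foldl_attach (f := fun strengths p =>
      if get_bridge_strengths (if p.1 ≠ c then p.1 else p.2) (PySem.Set.diff pieces [p]) = []
      then strengths ++ [p.1 + p.2]
      else strengths ++ (get_bridge_strengths (if p.1 ≠ c then p.1 else p.2) (PySem.Set.diff pieces [p])).map
             (fun tcs => tcs + p.1 + p.2))]
    rw [PySem.List.foldl_congr_mem _ _ (fun acc p => acc ++ gA c pieces p) []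
      (by intro acc p _; unfold gA; simp only []; split <;> split <;> simp_all)]
    rw [PySem.List.foldl_append_eq_flatMap]
    rfl

theorem A_eq_nil_iff (c : Int) (pieces : List (Int × Int)) :
    get_bridge_strengths c pieces = [] ↔ connecting_alt c pieces = [] := by
  rw [A_eq_flatMap, connecting_eq]
  constructor
  · intro h
    rcases List.eq_nil_or_concat (connecting_alt c pieces) with h' | ⟨l, p, h'⟩
    · exact h'
    · exact absurd (List.flatMap_eq_nil_iff.1 h p (by simp [h'])) (gA_ne_nil c pieces p)
  · intro h; rw [h]; rfl

-- each child contribution of B equals A's contribution shifted by the running total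
theorem child_contrib (c total : Int) (remaining : List (Int × Int)) (p : Int × Int) :
    (if get_bridge_strengths (if p.1 = c then p.2 else p.1) (PySem.Set.diff remaining [p]) = []
       then [total + p.1 + p.2]
       else (get_bridge_strengths (if p.1 = c then p.2 else p.1) (PySem.Set.diff remaining [p])).map
              (fun t => t + (total + p.1 + p.2)))
    = (gA c remaining p).map (fun t => t + total) := by
  have hnc : (if p.1 = c then p.2 else p.1) = (if p.1 ≠ c then p.1 else p.2) := by
    by_cases h : p.1 = c <;> simp [h]
  rw [hnc]
  unfold gA
  by_cases hL : get_bridge_strengths (if p.1 ≠ c then p.1 else p.2) (PySem.Set.diff remaining [p]) = []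
  · simp only [hL, if_pos, List.map_cons, List.map_nil]
    congr 1
    ring
  · simp only [hL, if_neg, not_false_iff, List.map_map]
    have hfun : ((fun t : Int => t + total) ∘ (fun tcs : Int => tcs + p.1 + p.2))
        = (fun t : Int => t + (total + p.1 + p.2)) := by
      funext t; simp only [Function.comp_apply]; ring
    rw [hfun]

-- the main invariant: a non-root DFS call appends to `s` exactly A's list shifted by `total`
theorem dfs_false_eq (n : Nat) : ∀ (remaining : List (Int × Int)), remaining.length ≤ n →
    ∀ (c total : Int) (s : List Int),
    dfs_alt c remaining total false s
      = s ++ (if get_bridge_strengths c remaining = [] then [total]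
              else (get_bridge_strengths c remaining).map (fun t => t + total)) := by
  induction n with
  | zero =>
    intro remaining hlen c total s
    have : remaining = [] := List.eq_nil_of_length_eq_zero (Nat.le_zero.1 hlen)
    subst this
    rw [dfs_alt]
    simp [connecting_alt, PySem.Set.ofList, PySem.Set.empty, A_nil]
  | succ m ih =>
    intro remaining hlen c total s
    rw [dfs_alt]
    simp only []
    by_cases hc : connecting_alt c remaining = []
    · rw [if_pos hc]
      have hA : get_bridge_strengths c remaining = [] := (A_eq_nil_iff c remaining).2 hc
      simp [hA]
    · rw [if_neg hc]
      have hA : get_bridge_strengths c remaining ≠ [] :=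
        fun h => hc ((A_eq_nil_iff c remaining).1 h)
      rw [if_neg hA]
      rw [List.foldl_attach (f := fun acc p =>
        dfs_alt (if p.1 = c then p.2 else p.1) (PySem.Set.diff remaining [p])
          (total + p.1 + p.2) false acc)]
      -- inner induction over the candidate list
      have inner : ∀ (l : List (Int × Int)), (∀ p ∈ l, p ∈ remaining) → ∀ (s' : List Int),
          l.foldl (fun acc p =>
              dfs_alt (if p.1 = c then p.2 else p.1) (PySem.Set.diff remaining [p])
                (total + p.1 + p.2) false acc) s'
            = s' ++ l.flatMap (fun p => (gA c remaining p).map (fun t => t + total)) := by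
        intro l
        induction l with
        | nil => intro _ s'; simp
        | cons q qs ihl =>
          intro hmem s'
          have hq : q ∈ remaining := hmem q (List.mem_cons_self ..)
          have hle : (PySem.Set.diff remaining [q]).length ≤ m := by
            have := length_diff_single_lt remaining q hq
            omega
          simp only [List.foldl_cons]
          rw [ihl (fun p hp => hmem p (List.mem_cons_of_mem _ hp))]
          rw [ih _ hle]
          rw [child_contrib c total remaining q]
          simp [List.flatMap_cons]
      rw [inner _ (fun p hp => mem_of_mem_connecting_alt c remaining p hp) s]
      rw [A_eq_flatMap c remaining, connecting_eq, List.map_flatMap]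

-- ===== VERDICT (by name: the statement is the Claim_ definition above) =====
theorem get_bridge_strengths_spec : Claim_equal_get_bridge_strengths := by
  intro c pieces _
  unfold Spec_get_bridge_strengths get_bridge_strengths_alt
  by_cases hc : connecting_alt c pieces = []
  · rw [dfs_alt]
    simp only []
    rw [if_pos hc]
    simpa using (A_eq_nil_iff c pieces).2 hc
  · have h1 : dfs_alt c pieces 0 true [] = dfs_alt c pieces 0 false [] := by
      rw [dfs_alt, dfs_alt]
      simp only []
      rw [if_neg hc, if_neg hc]
    have hA : get_bridge_strengths c pieces ≠ [] :=
      fun h => hc ((A_eq_nil_iff c pieces).1 h)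
    rw [h1, dfs_false_eq pieces.length pieces le_rfl c 0 [], if_neg hA]
    simp
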